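-- pv_equiv track=rewrite | github.com/Aryukhin/GB_hw | hw_5/fifth_task.py | unic_num
-- ===== SOURCE A (Python) =====
-- def unic_num(src):
--     unic = set()
--     basket = set()
--
--     for i in src:
--         if i not in basket:
--             unic.add(i)
--         else:
--             unic.discard(i)
--         basket.add(i)
--
--     result = [el for el in src if el in unic]
--     return result
-- ===== SOURCE B (Python) =====
-- def unic_num(src):
--     first = {}
--     last = {}
--     for i, el in enumerate(src):
--         if el not in first:
--             first[el] = i
--         last[el] = i
--     return [el for el in first if first[el] == last[el]]
-- ===== Notes on version B (the rewrite author's own statement) =====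
-- stated objective: alternative
-- what changed: Replaces A's two-set toggle plus a second filtering pass over src with a first/last occurrence-index criterion: one pass records each element's first and last index in two dicts, and the result is read off the first-occurrence dict's key order, keeping elements whose first and last indices coincide.
import Mathlib
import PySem

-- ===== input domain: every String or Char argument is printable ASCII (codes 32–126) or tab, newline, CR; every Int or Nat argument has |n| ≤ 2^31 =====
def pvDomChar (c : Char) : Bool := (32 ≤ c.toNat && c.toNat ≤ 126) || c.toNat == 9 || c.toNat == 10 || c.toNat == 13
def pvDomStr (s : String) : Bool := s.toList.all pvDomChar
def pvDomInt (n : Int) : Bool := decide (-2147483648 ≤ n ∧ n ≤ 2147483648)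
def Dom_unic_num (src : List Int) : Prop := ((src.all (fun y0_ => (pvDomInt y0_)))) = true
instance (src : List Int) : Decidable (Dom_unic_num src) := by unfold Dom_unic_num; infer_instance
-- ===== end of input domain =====

-- B replaces A's two-set toggle + second pass over src with a first/last occurrence-index criterion read off a dict's key order (alternative; same cost).


-- ===== PORT A =====
-- A's loop: for i in src: (add i to unic if i not in basket else discard); basket.add(i)
def unicNumLoopA (src : List Int) : PySem.Set Int × PySem.Set Int :=
  src.foldl
    (fun (p : PySem.Set Int × PySem.Set Int) i =>
      (if ¬ (PySem.Set.contains p.2 i) then PySem.Set.add p.1 i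
       else PySem.Set.discard p.1 i,
       PySem.Set.add p.2 i))
    (PySem.Set.empty, PySem.Set.empty)

-- literal port of A: run the loop, then [el for el in src if el in unic]
def unic_num (src : List Int) : List Int :=
  src.filter (fun el => PySem.Set.contains (unicNumLoopA src).1 el)

-- ===== PORT B =====
-- B's loop: for i, el in enumerate(src): if el not in first: first[el] = i; last[el] = i
def unicAltLoop (src : List Int) : PySem.Dict Int Int × PySem.Dict Int Int :=
  (PySem.List.enumerate src 0).foldl
    (fun (p : PySem.Dict Int Int × PySem.Dict Int Int) q =>
      (if ¬ p.1.contains q.2 then p.1.insert q.2 q.1 else p.1,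
       p.2.insert q.2 q.1))
    (PySem.Dict.empty, PySem.Dict.empty)

-- port of B: [el for el in first if first[el] == last[el]]
-- (first[el] / last[el] never raise here: every iterated el is a key of both dicts,
--  so comparing the two Option values with == is exact)
def unic_num_alt (src : List Int) : List Int :=
  (unicAltLoop src).1.keys.filter
    (fun el => (unicAltLoop src).1.get? el == (unicAltLoop src).2.get? el)

-- ===== PRECONDITION & SPEC =====
def Spec_unic_num (src : List Int) (out : List Int) : Prop := out = unic_num_alt src
instance (src : List Int) (out : List Int) : Decidable (Spec_unic_num src out) := by unfold Spec_unic_num; infer_instance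

-- ===== CLAIM =====
def Claim_equal_unic_num : Prop := ∀ (src : List Int), Dom_unic_num src → Spec_unic_num src (unic_num src)

-- ===== LEMMAS AND PROOFS =====

-- loop invariant of A's fold: basket is the set of elements seen so far, and unic holds
-- exactly the elements occurring exactly once
theorem unicNumLoopA_inv (xs : List Int) :
    (unicNumLoopA xs).2 = PySem.Set.ofList xs ∧
    ∀ y : Int, (y ∈ (unicNumLoopA xs).1) ↔ xs.count y = 1 := by
  induction xs using List.reverseRecOn with
  | nil =>
    refine ⟨rfl, ?_⟩
    intro y
    simp [unicNumLoopA, PySem.Set.empty]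
  | append_singleton xs x ih =>
    obtain ⟨hb, hu⟩ := ih
    unfold unicNumLoopA at *
    rw [List.foldl_append] at *
    simp only [List.foldl_cons, List.foldl_nil]
    constructor
    · rw [hb, PySem.Set.ofList_append_singleton]
    · intro y
      rw [hb]
      by_cases hmem : x ∈ xs
      · have hc : PySem.Set.contains (PySem.Set.ofList xs) x = true :=
          (PySem.Set.contains_iff _ _).mpr ((PySem.Set.mem_ofList _ _).mpr hmem)
        have hcount : 1 ≤ xs.count x := List.one_le_count_iff.mpr hmem
        simp only [hc, not_true_eq_false, if_false]
        rw [PySem.Set.mem_discard]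
        by_cases hyx : y = x
        · subst hyx
          simp only [List.count_append, List.count_singleton, ne_eq, not_true_eq_false,
            and_false, false_iff, beq_self_eq_true, if_true]
          omega
        · rw [hu y]
          simp [List.count_append, hyx, Ne.symm hyx]
      · have hc : PySem.Set.contains (PySem.Set.ofList xs) x = false := by
          rw [Bool.eq_false_iff]
          intro h
          exact hmem ((PySem.Set.mem_ofList _ _).mp ((PySem.Set.contains_iff _ _).mp h))
        simp only [hc, Bool.false_eq_true, not_false_eq_true, if_true]
        rw [PySem.Set.mem_add]
        by_cases hyx : y = x
        · subst hyx
          have h0 : xs.count y = 0 := List.count_eq_zero_of_not_mem hmem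
          simp [List.count_append, h0]
        · rw [hu y]
          simp [List.count_append, hyx, Ne.symm hyx]

-- characterisation of A: it filters src by "occurs exactly once"
theorem unic_num_eq_filter (src : List Int) :
    unic_num src = src.filter (fun el => src.count el == 1) := by
  unfold unic_num
  apply List.filter_congr
  intro el _
  have h := (unicNumLoopA_inv src).2 el
  rw [Bool.eq_iff_iff, PySem.Set.contains_iff, beq_iff_eq, h]

-- invariant of B's fold: first's keys are the distinct elements in order, first maps each
-- seen element to an index below the length, and first/last agree exactly on the elements
-- occurring exactly once
theorem unicAltLoop_inv (xs : List Int) :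
    (unicAltLoop xs).1.keys = PySem.Set.ofList xs ∧
    (∀ el : Int, el ∈ xs → ∃ j : ℕ, (unicAltLoop xs).1.get? el = some (j : Int) ∧ j < xs.length) ∧
    (∀ el : Int, el ∈ xs →
      (((unicAltLoop xs).1.get? el == (unicAltLoop xs).2.get? el) = true ↔ xs.count el = 1)) := by
  induction xs using List.reverseRecOn with
  | nil =>
    refine ⟨rfl, ?_, ?_⟩ <;> intro el h <;> simp at h
  | append_singleton xs x ih =>
    obtain ⟨hk, hj, hc⟩ := ih
    unfold unicAltLoop at *
    rw [PySem.List.enumerate_append, List.foldl_append] at *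
    simp only [PySem.List.enumerate_cons, PySem.List.enumerate_nil, List.foldl_cons,
      List.foldl_nil, zero_add]
    set P := (PySem.List.enumerate xs 0).foldl
      (fun (p : PySem.Dict Int Int × PySem.Dict Int Int) q =>
        (if ¬ p.1.contains q.2 then p.1.insert q.2 q.1 else p.1,
         p.2.insert q.2 q.1))
      (PySem.Dict.empty, PySem.Dict.empty) with hP
    by_cases hmem : x ∈ xs
    · have hcont : P.1.contains x = true := by
        rw [PySem.Dict.contains_iff_mem_keys, hk]
        exact (PySem.Set.mem_ofList _ _).mpr hmem
      simp only [hcont, not_true_eq_false, if_false]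
      refine ⟨?_, ?_, ?_⟩
      · rw [hk, PySem.Set.ofList_append_singleton, PySem.Set.add,
          PySem.Set.contains_eq_listContains]
        simp [PySem.Set.mem_ofList, hmem]
      · intro el hel
        rcases List.mem_append.mp hel with h | h
        · obtain ⟨j, e, lt⟩ := hj el h
          exact ⟨j, e, by simp; omega⟩
        · obtain ⟨j, e, lt⟩ := hj x hmem
          simp only [List.mem_singleton] at h; subst h
          exact ⟨j, e, by simp; omega⟩
      · intro el hel
        by_cases hx : el = x
        · subst hx
          obtain ⟨j, e, lt⟩ := hj el hmem
          rw [e, PySem.Dict.get?_insert_self]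
          have hne : ((some (j : Int) == some ((xs.length : Int))) = false) := by
            rw [beq_eq_false_iff_ne]
            intro hcontra
            have : (j : Int) = (xs.length : Int) := by injection hcontra
            omega
          rw [hne]
          have : 1 ≤ xs.count el := List.one_le_count_iff.mpr hmem
          simp [List.count_append]
          omega
        · rw [PySem.Dict.get?_insert_of_ne _ _ hx]
          have hel' : el ∈ xs := by
            rcases List.mem_append.mp hel with h | h
            · exact h
            · simp only [List.mem_singleton] at h; exact absurd h hx
          rw [List.count_append]
          have hxe : x ≠ el := fun h => hx h.symm
          simpa [List.count_singleton, hxe] using hc el hel'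
    · have hcont : P.1.contains x = false := by
        rw [Bool.eq_false_iff]
        intro h
        rw [PySem.Dict.contains_iff_mem_keys, hk] at h
        exact hmem ((PySem.Set.mem_ofList _ _).mp h)
      simp only [hcont, Bool.false_eq_true, not_false_eq_true, if_true]
      refine ⟨?_, ?_, ?_⟩
      · rw [PySem.Dict.keys_insert_of_not_contains _ _ hcont, hk,
          PySem.Set.ofList_append_singleton, PySem.Set.add]
        have : PySem.Set.contains (PySem.Set.ofList xs) x = false := by
          rw [Bool.eq_false_iff]
          intro h
          exact hmem ((PySem.Set.mem_ofList _ _).mp ((PySem.Set.contains_iff _ _).mp h))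
        rw [this]; simp
      · intro el hel
        by_cases hx : el = x
        · subst hx
          exact ⟨xs.length, by rw [PySem.Dict.get?_insert_self], by simp⟩
        · have hel' : el ∈ xs := by
            rcases List.mem_append.mp hel with h | h
            · exact h
            · simp only [List.mem_singleton] at h; exact absurd h hx
          obtain ⟨j, e, lt⟩ := hj el hel'
          rw [PySem.Dict.get?_insert_of_ne _ _ hx]
          exact ⟨j, e, by simp; omega⟩
      · intro el hel
        by_cases hx : el = x
        · subst hx
          rw [PySem.Dict.get?_insert_self, PySem.Dict.get?_insert_self]
          have h0 : xs.count el = 0 := List.count_eq_zero_of_not_mem hmem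
          simp [List.count_append, h0]
        · rw [PySem.Dict.get?_insert_of_ne _ _ hx,
            PySem.Dict.get?_insert_of_ne _ _ hx]
          have hel' : el ∈ xs := by
            rcases List.mem_append.mp hel with h | h
            · exact h
            · simp only [List.mem_singleton] at h; exact absurd h hx
          rw [List.count_append]
          have hxe : x ≠ el := fun h => hx h.symm
          simpa [List.count_singleton, hxe] using hc el hel'

-- filtering the deduplicated list equals filtering the list itself, when the predicate
-- only holds on elements occurring at most once
theorem filter_ofList_eq (p : Int → Bool) :
    ∀ xs : List Int, (∀ x : Int, p x = true → xs.count x ≤ 1) →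
    (PySem.Set.ofList xs).filter p = xs.filter p := by
  intro xs
  induction xs using List.reverseRecOn with
  | nil => intro _; rfl
  | append_singleton xs x ih =>
    intro h
    have h' : ∀ y : Int, p y = true → xs.count y ≤ 1 := by
      intro y hy
      have := h y hy
      rw [List.count_append] at this
      omega
    rw [PySem.Set.ofList_append_singleton, PySem.Set.add]
    by_cases hmem : x ∈ xs
    · have hcont : PySem.Set.contains (PySem.Set.ofList xs) x = true :=
        (PySem.Set.contains_iff _ _).mpr ((PySem.Set.mem_ofList _ _).mpr hmem)
      rw [hcont]
      have hpx : p x = false := by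
        rw [Bool.eq_false_iff]
        intro hpx
        have := h x hpx
        have h1 : 1 ≤ xs.count x := List.one_le_count_iff.mpr hmem
        rw [List.count_append] at this
        simp at this
        omega
      simp only [List.filter_append, List.filter_cons, hpx, Bool.false_eq_true,
        if_false, List.filter_nil, List.append_nil]
      exact ih h'
    · have hcont : PySem.Set.contains (PySem.Set.ofList xs) x = false := by
        rw [Bool.eq_false_iff]
        intro hc
        exact hmem ((PySem.Set.mem_ofList _ _).mp ((PySem.Set.contains_iff _ _).mp hc))
      rw [hcont]
      simp only [Bool.false_eq_true, if_false, List.filter_append]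
      rw [ih h']

-- characterisation of B: it also filters src by "occurs exactly once"
theorem unic_num_alt_eq_filter (src : List Int) :
    unic_num_alt src = src.filter (fun el => src.count el == 1) := by
  obtain ⟨hk, _, hc⟩ := unicAltLoop_inv src
  unfold unic_num_alt
  rw [hk]
  have step : (PySem.Set.ofList src).filter
      (fun el => (unicAltLoop src).1.get? el == (unicAltLoop src).2.get? el)
      = (PySem.Set.ofList src).filter (fun el => src.count el == 1) := by
    apply List.filter_congr
    intro el hel
    have hmem : el ∈ src := (PySem.Set.mem_ofList _ _).mp hel
    rw [Bool.eq_iff_iff]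
    have h := hc el hmem
    simp only [beq_iff_eq] at h ⊢
    exact h
  rw [step]
  apply filter_ofList_eq
  intro x hx
  rw [beq_iff_eq] at hx
  omega

-- ===== VERDICT =====
theorem unic_num_spec : Claim_equal_unic_num := by
  intro src _
  unfold Spec_unic_num
  rw [unic_num_eq_filter, unic_num_alt_eq_filter]
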